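-- pv_equiv track=rewrite | github.com/standard-tryhard/centi_film | hundMov_bb_operators_data.py | populate_dict_with_default_values
-- ===== SOURCE A (Python) =====
-- def populate_dict_with_default_values(a_dict_, placeholder_='...'):
--     for idx_ in range(1, 101):
--
--         try:
--             has_an_actual_movie_ = (a_dict_[idx_] != placeholder_)
--             continue
--         except:
--             a_dict_.update({idx_: placeholder_})
--
--     return sorted(a_dict_.items())
-- ===== SOURCE B (Python) =====
-- def populate_dict_with_default_values(a_dict_, placeholder_='...'):
--     # Sort the existing items once, then two-pointer MERGE them with range(1,101),
--     # producing the sorted result directly (no membership probing, no final sort).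
--     existing = sorted(a_dict_.items())
--     out = []
--     e = 0
--     for k in range(1, 101):
--         while e < len(existing) and existing[e][0] < k:
--             out.append(existing[e])
--             e += 1
--         if e < len(existing) and existing[e][0] == k:
--             out.append(existing[e])
--             e += 1
--         else:
--             a_dict_[k] = placeholder_   # same in-place fill as A, in the same order
--             out.append((k, placeholder_))
--     out.extend(existing[e:])
--     return out
-- ===== Notes on version B (the rewrite author's own statement) =====
-- stated objective: alternative
-- what changed: A probes every key 1..100 with a try/except lookup and then sorts the augmented dict; B sorts the existing items once and two-pointer MERGES them with range(1,101), emitting the sorted result directly with no per-key membership test and no final sort.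
import Mathlib
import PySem

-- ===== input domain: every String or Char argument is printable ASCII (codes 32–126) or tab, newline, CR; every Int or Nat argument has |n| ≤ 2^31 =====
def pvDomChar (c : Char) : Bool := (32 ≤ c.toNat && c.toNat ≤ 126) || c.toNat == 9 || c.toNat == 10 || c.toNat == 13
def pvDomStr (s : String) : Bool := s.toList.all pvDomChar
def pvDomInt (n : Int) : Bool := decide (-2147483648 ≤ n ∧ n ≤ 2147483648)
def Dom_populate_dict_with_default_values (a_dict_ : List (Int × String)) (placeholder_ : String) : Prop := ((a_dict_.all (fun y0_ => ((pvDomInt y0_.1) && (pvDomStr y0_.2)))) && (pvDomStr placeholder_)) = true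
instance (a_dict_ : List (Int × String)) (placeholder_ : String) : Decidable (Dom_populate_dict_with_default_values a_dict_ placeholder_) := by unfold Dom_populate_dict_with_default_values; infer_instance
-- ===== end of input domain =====

-- B sorts the existing items once and two-pointer merges them with range(1,101) instead of
-- A's per-key try/except probe followed by a sort; equivalence is about the RETURN value
-- (both Pythons also mutate a_dict_ in place to the same final dict contents).

-- ===== PORT A =====
def populate_dict_with_default_values (a_dict_ : List (Int × String)) (placeholder_ : String) : List (Int × String) :=
  let d0 := PySem.Dict.ofList a_dict_
  let d := (PySem.List.pyRange 1 101).foldl (fun d idx_ =>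
    match d.get? idx_ with
    | some _ => d                        -- lookup succeeds: has_an_actual_movie_ computed, continue
    | none => d.insert idx_ placeholder_ -- KeyError: a_dict_.update({idx_: placeholder_})
    ) d0
  PySem.List.sorted2 d.items Prod.fst Prod.snd  -- sorted(d.items()): tuple compare

-- ===== PORT B =====
-- the for-loop of Source B: one recursive step per k in range(1,101); the inner while-loop that
-- advances the pointer over keys < k is takeWhile/dropWhile on the remaining existing items
def pvMergeFill (placeholder_ : String) : List Int → List (Int × String) → List (Int × String)
  | [], ex => ex                         -- out.extend(existing[e:])
  | k :: ks, ex =>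
    let lt := ex.takeWhile (fun p => decide (p.1 < k))
    let rest := ex.dropWhile (fun p => decide (p.1 < k))
    match rest with
    | [] => lt ++ (k, placeholder_) :: pvMergeFill placeholder_ ks []
    | (k', v) :: rest' =>
      if k' = k then lt ++ (k', v) :: pvMergeFill placeholder_ ks rest'
      else lt ++ (k, placeholder_) :: pvMergeFill placeholder_ ks ((k', v) :: rest')

def populate_dict_with_default_values_alt (a_dict_ : List (Int × String)) (placeholder_ : String) : List (Int × String) :=
  let d0 := PySem.Dict.ofList a_dict_
  let existing := PySem.List.sorted2 d0.items Prod.fst Prod.snd   -- sorted(a_dict_.items())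
  pvMergeFill placeholder_ (PySem.List.pyRange 1 101) existing

-- ===== PRECONDITION & SPEC =====
def Spec_populate_dict_with_default_values (a_dict_ : List (Int × String)) (placeholder_ : String) (out : List (Int × String)) : Prop := out = populate_dict_with_default_values_alt a_dict_ placeholder_
instance (a_dict_ : List (Int × String)) (placeholder_ : String) (out : List (Int × String)) : Decidable (Spec_populate_dict_with_default_values a_dict_ placeholder_ out) := by unfold Spec_populate_dict_with_default_values; infer_instance

-- ===== CLAIM (what is proved, stated in full; the proofs are below) =====
def Claim_equal_populate_dict_with_default_values : Prop := ∀ (a_dict_ : List (Int × String)) (placeholder_ : String), Dom_populate_dict_with_default_values a_dict_ placeholder_ → Spec_populate_dict_with_default_values a_dict_ placeholder_ (populate_dict_with_default_values a_dict_ placeholder_)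

-- ===== LEMMAS AND PROOFS =====

-- A's conditional-insert loop over distinct keys equals a filter-then-insert pass,
-- as long as membership of each pending key agrees with the predicate p.
theorem pv_fold_eq (placeholder_ : String) (p : Int → Bool) :
    ∀ (l : List Int) (d : PySem.Dict Int String), l.Nodup →
      (∀ i ∈ l, (d.get? i).isSome = p i) →
      l.foldl (fun d idx_ =>
          match d.get? idx_ with
          | some _ => d
          | none => d.insert idx_ placeholder_) d
        = (l.filter (fun i => !(p i))).foldl (fun d idx_ => d.insert idx_ placeholder_) d := by
  intro l
  induction l with
  | nil => intro d _ _; rfl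
  | cons i l ih =>
    intro d hnd hmem
    rw [List.nodup_cons] at hnd
    have hi := hmem i (by simp)
    rw [List.foldl_cons]
    cases hget : d.get? i with
    | some v =>
      have hp : p i = true := by rw [← hi, hget]; rfl
      have hf : List.filter (fun j => !(p j)) (i :: l) = List.filter (fun j => !(p j)) l := by
        rw [List.filter_cons_of_neg]; simp [hp]
      rw [hf]
      exact ih d hnd.2 (fun j hj => hmem j (List.mem_cons_of_mem _ hj))
    | none =>
      have hp : p i = false := by rw [← hi, hget]; rfl
      have hf : List.filter (fun j => !(p j)) (i :: l) = i :: List.filter (fun j => !(p j)) l := by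
        rw [List.filter_cons_of_pos]; simp [hp]
      rw [hf, List.foldl_cons]
      exact ih (d.insert i placeholder_) hnd.2 (fun j hj => by
        have hne : j ≠ i := fun h => hnd.1 (h ▸ hj)
        rw [PySem.Dict.get?_insert, if_neg hne]
        exact hmem j (List.mem_cons_of_mem _ hj))

-- insertBy only compares the inserted element against accumulator members
theorem pv_insertBy_congr {α : Type} (p q : α → α → Bool) (x : α) :
    ∀ (acc : List α), (∀ y ∈ acc, p x y = q x y) →
      PySem.List.insertBy p x acc = PySem.List.insertBy q x acc := by
  intro acc
  induction acc with
  | nil => intro _; rfl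
  | cons y ys ih =>
    intro h
    simp only [PySem.List.insertBy]
    rw [h y (by simp)]
    by_cases hq : q x y = true
    · simp [hq]
    · simp only [Bool.not_eq_true] at hq
      simp only [hq, Bool.false_eq_true, if_false]
      exact congrArg (y :: ·) (ih (fun z hz => h z (by simp [hz])))

-- a fold of insertBy only ever compares two members of acc ++ l
theorem pv_foldl_insertBy_congr {α : Type} (p q : α → α → Bool) :
    ∀ (l acc : List α), (∀ x ∈ l, ∀ y, (y ∈ acc ∨ y ∈ l) → p x y = q x y) →
      l.foldl (fun acc x => PySem.List.insertBy p x acc) acc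
        = l.foldl (fun acc x => PySem.List.insertBy q x acc) acc := by
  intro l
  induction l with
  | nil => intro _ _; rfl
  | cons x xs ih =>
    intro acc h
    rw [List.foldl_cons, List.foldl_cons,
        pv_insertBy_congr p q x acc (fun y hy => h x (by simp) y (Or.inl hy))]
    refine ih _ (fun x' hx' y hy => ?_)
    refine h x' (by simp [hx']) y ?_
    rcases hy with hy | hy
    · rw [PySem.List.mem_insertBy] at hy
      rcases hy with rfl | hy
      · exact Or.inr (by simp)
      · exact Or.inl hy
    · exact Or.inr (by simp [hy])

-- when the first keys are pairwise distinct, Python's tuple sort is the sort by first key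
theorem pv_sorted2_eq_sorted_fst (l : List (Int × String))
    (h : (l.map Prod.fst).Nodup) :
    PySem.List.sorted2 l Prod.fst Prod.snd false = PySem.List.sorted l Prod.fst false := by
  rw [PySem.List.sorted_eq_foldl_insertBy]
  show l.foldl (fun acc x => PySem.List.insertBy
      (fun a b => decide (a.1 < b.1) || (!decide (b.1 < a.1) && decide (a.2 < b.2))) x acc) []
    = _
  refine pv_foldl_insertBy_congr _ _ l [] (fun x hx y hy => ?_)
  rcases hy with hy | hy
  · simp at hy
  · rcases lt_trichotomy x.1 y.1 with hlt | heq | hgt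
    · simp [hlt, not_lt_of_gt hlt]
    · have : x = y := List.inj_on_of_nodup_map h hx hy heq
      subst this
      simp
    · simp [hgt, not_lt_of_gt hgt]


-- equation lemmas for pvMergeFill (the match on dropWhile, made rewritable)
theorem pvMergeFill_nil_eq (ph : String) (k : Int) (ks : List Int) (ex : List (Int × String))
    (h : ex.dropWhile (fun p => decide (p.1 < k)) = []) :
    pvMergeFill ph (k :: ks) ex
      = ex.takeWhile (fun p => decide (p.1 < k)) ++ (k, ph) :: pvMergeFill ph ks [] := by
  rw [pvMergeFill, h]

theorem pvMergeFill_cons_eq (ph : String) (k : Int) (ks : List Int) (ex : List (Int × String))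
    (k' : Int) (v : String) (tl : List (Int × String))
    (h : ex.dropWhile (fun p => decide (p.1 < k)) = (k', v) :: tl) :
    pvMergeFill ph (k :: ks) ex
      = if k' = k then ex.takeWhile (fun p => decide (p.1 < k)) ++ (k', v) :: pvMergeFill ph ks tl
        else ex.takeWhile (fun p => decide (p.1 < k)) ++ (k, ph) :: pvMergeFill ph ks ((k', v) :: tl) := by
  rw [pvMergeFill, h]

-- every element of the merge comes from the existing items or is a filled-in key
theorem pv_mem_mergeFill (ph : String) :
    ∀ (ks : List Int) (ex : List (Int × String)) (p : Int × String),
      p ∈ pvMergeFill ph ks ex → p ∈ ex ∨ p.1 ∈ ks := by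
  intro ks
  induction ks with
  | nil => intro ex p hp; exact Or.inl hp
  | cons k ks ih =>
    intro ex p hp
    have hsub : ∀ q : Int × String, q ∈ ex.dropWhile (fun r => decide (r.1 < k)) → q ∈ ex :=
      fun q hq => (List.dropWhile_sublist _).mem hq
    have hlt : ∀ q : Int × String, q ∈ ex.takeWhile (fun r => decide (r.1 < k)) → q ∈ ex :=
      fun q hq => (List.takeWhile_sublist _).mem hq
    cases hrest : ex.dropWhile (fun r => decide (r.1 < k)) with
    | nil =>
      rw [pvMergeFill_nil_eq ph k ks ex hrest] at hp
      rcases List.mem_append.1 hp with h | h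
      · exact Or.inl (hlt _ h)
      · rcases List.mem_cons.1 h with rfl | h
        · exact Or.inr (by simp)
        · rcases ih [] p h with h | h
          · simp at h
          · exact Or.inr (by simp [h])
    | cons hd tl =>
      obtain ⟨k', v⟩ := hd
      rw [pvMergeFill_cons_eq ph k ks ex k' v tl hrest] at hp
      by_cases hk : k' = k
      · rw [if_pos hk] at hp
        rcases List.mem_append.1 hp with h | h
        · exact Or.inl (hlt _ h)
        · rcases List.mem_cons.1 h with rfl | h
          · exact Or.inl (hsub _ (by rw [hrest]; simp))
          · rcases ih tl p h with h | h
            · exact Or.inl (hsub _ (by rw [hrest]; simp [h]))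
            · exact Or.inr (by simp [h])
      · rw [if_neg hk] at hp
        rcases List.mem_append.1 hp with h | h
        · exact Or.inl (hlt _ h)
        · rcases List.mem_cons.1 h with rfl | h
          · exact Or.inr (by simp)
          · rcases ih ((k', v) :: tl) p h with h | h
            · exact Or.inl (hsub _ (by rw [hrest]; exact h))
            · exact Or.inr (by simp [h])

-- the head of a dropWhile fails the predicate
theorem pv_dropWhile_head_false {α : Type} (p : α → Bool) :
    ∀ (l : List α) (x : α) (xs : List α), l.dropWhile p = x :: xs → p x = false := by
  intro l
  induction l with
  | nil => intro x xs h; simp [List.dropWhile] at h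
  | cons y ys ih =>
    intro x xs h
    rw [List.dropWhile_cons] at h
    by_cases hy : p y = true
    · rw [if_pos hy] at h; exact ih x xs h
    · rw [if_neg hy] at h
      cases h
      simpa using hy

-- the merge is a permutation of the existing items plus the missing keys filled in
theorem pv_mergeFill_perm (ph : String) :
    ∀ (ks : List Int) (ex : List (Int × String)),
      ks.Pairwise (· < ·) → ex.Pairwise (fun a b => a.1 < b.1) →
      (pvMergeFill ph ks ex).Perm
        (ex ++ (ks.filter (fun k => !decide (k ∈ ex.map Prod.fst))).map (fun k => (k, ph))) := by
  intro ks
  induction ks with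
  | nil => intro ex _ _; simp [pvMergeFill]
  | cons k ks ih =>
    intro ex hks hex
    rw [List.pairwise_cons] at hks
    have hsplit : ex.takeWhile (fun r => decide (r.1 < k)) ++ ex.dropWhile (fun r => decide (r.1 < k)) = ex :=
      List.takeWhile_append_dropWhile
    have hltk : ∀ q : Int × String, q ∈ ex.takeWhile (fun r => decide (r.1 < k)) → q.1 < k :=
      fun q hq => by simpa using List.mem_takeWhile_imp hq
    cases hrest : ex.dropWhile (fun r => decide (r.1 < k)) with
    | nil =>
      rw [pvMergeFill_nil_eq ph k ks ex hrest]
      rw [hrest, List.append_nil] at hsplit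
      have hkmem : decide (k ∈ ex.map Prod.fst) = false := by
        simp only [decide_eq_false_iff_not, List.mem_map]
        rintro ⟨q, hq, rfl⟩
        rw [← hsplit] at hq
        exact lt_irrefl _ (hltk q hq)
      rw [List.filter_cons_of_pos (by simp [hkmem])]
      have hrec := ih [] hks.2 List.Pairwise.nil
      rw [List.nil_append] at hrec
      have hfk : List.filter (fun k' => !decide (k' ∈ List.map Prod.fst ([] : List (Int × String)))) ks
          = List.filter (fun k' => !decide (k' ∈ ex.map Prod.fst)) ks := by
        refine List.filter_congr (fun k' hk' => ?_)
        have hkk' := hks.1 k' hk'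
        have hnot : k' ∉ ex.map Prod.fst := by
          intro hm
          rw [List.mem_map] at hm
          obtain ⟨q, hq, hfst⟩ := hm
          rw [← hsplit] at hq
          have hlt := hltk q hq
          rw [hfst] at hlt
          exact lt_irrefl _ (lt_trans hkk' hlt)
        simp [hnot]
      rw [hfk] at hrec
      rw [hsplit]
      exact List.Perm.append_left ex (List.Perm.cons _ hrec)
    | cons hd tl =>
      obtain ⟨k', v⟩ := hd
      have hmemrest : ∀ q : Int × String, q ∈ (k', v) :: tl → q ∈ ex := by
        intro q hq
        exact (List.dropWhile_sublist _).mem (hrest ▸ hq)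
      have hrestpw : ((k', v) :: tl).Pairwise (fun a b => a.1 < b.1) :=
        hrest ▸ List.Pairwise.sublist (List.dropWhile_sublist _) hex
      have hk'ge : k ≤ k' := by
        have := pv_dropWhile_head_false _ ex (k', v) tl hrest
        simpa using this
      have hexmem : ∀ k'' , k < k'' → (decide (k'' ∈ ex.map Prod.fst)) = (decide (k'' ∈ ((k', v) :: tl).map Prod.fst)) := by
        intro k'' hk''
        rw [decide_eq_decide]
        constructor
        · rintro hm
          rw [List.mem_map] at hm
          obtain ⟨q, hq, hfst⟩ := hm
          rw [← hsplit] at hq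
          rcases List.mem_append.1 hq with h | h
          · have hlt := hltk q h
            rw [hfst] at hlt
            exact absurd (lt_trans hk'' hlt) (lt_irrefl _)
          · rw [hrest] at h
            exact hfst ▸ List.mem_map.2 ⟨q, h, rfl⟩
        · rintro hm
          rw [List.mem_map] at hm
          obtain ⟨q, hq, hfst⟩ := hm
          exact hfst ▸ List.mem_map.2 ⟨q, hmemrest q hq, rfl⟩
      rw [pvMergeFill_cons_eq ph k ks ex k' v tl hrest]
      by_cases hk : k' = k
      · subst hk
        rw [if_pos rfl]
        have hkin : decide (k' ∈ ex.map Prod.fst) = true := by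
          simp only [decide_eq_true_eq, List.mem_map]
          exact ⟨(k', v), hmemrest _ (by simp), rfl⟩
        rw [List.filter_cons_of_neg (by simp [hkin])]
        have htlpw : tl.Pairwise (fun a b => a.1 < b.1) := (List.pairwise_cons.1 hrestpw).2
        have hrec := ih tl hks.2 htlpw
        have hfcong : List.filter (fun k'' => !decide (k'' ∈ ex.map Prod.fst)) ks
            = List.filter (fun k'' => !decide (k'' ∈ tl.map Prod.fst)) ks := by
          refine List.filter_congr (fun k'' hk'' => ?_)
          have hgt := hks.1 k'' hk''
          rw [hexmem k'' hgt]
          have hiff : (k'' ∈ ((k', v) :: tl).map Prod.fst) ↔ (k'' ∈ tl.map Prod.fst) := by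
            simp only [List.map_cons, List.mem_cons]
            constructor
            · rintro (h | h)
              · exact absurd h (fun h => lt_irrefl _ (h ▸ hgt))
              · exact h
            · exact Or.inr
          rw [decide_eq_decide.2 hiff]
        rw [hfcong]
        conv_rhs => rw [← hsplit, hrest, List.append_assoc]
        exact List.Perm.append_left _ (List.Perm.cons _ hrec)
      · rw [if_neg hk]
        have hk'gt : k < k' := lt_of_le_of_ne hk'ge (fun h => hk h.symm)
        have hkout : decide (k ∈ ex.map Prod.fst) = false := by
          simp only [decide_eq_false_iff_not, List.mem_map]
          rintro ⟨q, hq, rfl⟩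
          rw [← hsplit] at hq
          rcases List.mem_append.1 hq with h | h
          · exact lt_irrefl _ (hltk q h)
          · rw [hrest] at h
            rcases List.mem_cons.1 h with h | h
            · exact lt_irrefl _ (h ▸ hk'gt)
            · have := (List.pairwise_cons.1 hrestpw).1 q h
              exact lt_irrefl _ (lt_trans hk'gt this)
        rw [List.filter_cons_of_pos (by simp [hkout])]
        have hrec := ih ((k', v) :: tl) hks.2 hrestpw
        have hfcong : List.filter (fun k'' => !decide (k'' ∈ ex.map Prod.fst)) ks
            = List.filter (fun k'' => !decide (k'' ∈ ((k', v) :: tl).map Prod.fst)) ks :=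
          List.filter_congr (fun k'' hk'' => by rw [hexmem k'' (hks.1 k'' hk'')])
        rw [hfcong]
        conv_rhs => rw [← hsplit, hrest, List.append_assoc]
        exact List.Perm.append_left _ ((List.Perm.cons _ hrec).trans List.perm_middle.symm)

-- the merge output is strictly increasing in the first key
theorem pv_mergeFill_pairwise (ph : String) :
    ∀ (ks : List Int) (ex : List (Int × String)),
      ks.Pairwise (· < ·) → ex.Pairwise (fun a b => a.1 < b.1) →
      (pvMergeFill ph ks ex).Pairwise (fun a b => a.1 < b.1) := by
  intro ks
  induction ks with
  | nil => intro ex _ hex; exact hex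
  | cons k ks ih =>
    intro ex hks hex
    rw [List.pairwise_cons] at hks
    have hltk : ∀ q : Int × String, q ∈ ex.takeWhile (fun r => decide (r.1 < k)) → q.1 < k :=
      fun q hq => by simpa using List.mem_takeWhile_imp hq
    have hltpw : (ex.takeWhile (fun r => decide (r.1 < k))).Pairwise (fun a b => a.1 < b.1) :=
      List.Pairwise.sublist (List.takeWhile_sublist _) hex
    cases hrest : ex.dropWhile (fun r => decide (r.1 < k)) with
    | nil =>
      rw [pvMergeFill_nil_eq ph k ks ex hrest]
      have hrec := ih [] hks.2 List.Pairwise.nil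
      refine List.pairwise_append.2 ⟨hltpw, List.pairwise_cons.2 ⟨?_, hrec⟩, ?_⟩
      · intro b hb
        rcases pv_mem_mergeFill ph ks [] b hb with h | h
        · simp at h
        · exact hks.1 _ h
      · intro a ha b hb
        have hak := hltk a ha
        rcases List.mem_cons.1 hb with rfl | hb
        · exact hak
        · rcases pv_mem_mergeFill ph ks [] b hb with h | h
          · simp at h
          · exact lt_trans hak (hks.1 _ h)
    | cons hd tl =>
      obtain ⟨k', v⟩ := hd
      have hrestpw : ((k', v) :: tl).Pairwise (fun a b => a.1 < b.1) :=
        hrest ▸ List.Pairwise.sublist (List.dropWhile_sublist _) hex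
      have htlpw := (List.pairwise_cons.1 hrestpw).2
      have htlgt := (List.pairwise_cons.1 hrestpw).1
      have hk'ge : k ≤ k' := by
        have := pv_dropWhile_head_false _ ex (k', v) tl hrest
        simpa using this
      rw [pvMergeFill_cons_eq ph k ks ex k' v tl hrest]
      by_cases hk : k' = k
      · subst hk
        rw [if_pos rfl]
        have hrec := ih tl hks.2 htlpw
        refine List.pairwise_append.2 ⟨hltpw, List.pairwise_cons.2 ⟨?_, hrec⟩, ?_⟩
        · intro b hb
          rcases pv_mem_mergeFill ph ks tl b hb with h | h
          · exact htlgt b h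
          · exact hks.1 _ h
        · intro a ha b hb
          have hak := hltk a ha
          rcases List.mem_cons.1 hb with rfl | hb
          · exact hak
          · rcases pv_mem_mergeFill ph ks tl b hb with h | h
            · exact lt_trans hak (htlgt b h)
            · exact lt_trans hak (hks.1 _ h)
      · rw [if_neg hk]
        have hk'gt : k < k' := lt_of_le_of_ne hk'ge (fun h => hk h.symm)
        have hrec := ih ((k', v) :: tl) hks.2 hrestpw
        refine List.pairwise_append.2 ⟨hltpw, List.pairwise_cons.2 ⟨?_, hrec⟩, ?_⟩
        · intro b hb
          rcases pv_mem_mergeFill ph ks ((k', v) :: tl) b hb with h | h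
          · rcases List.mem_cons.1 h with rfl | h
            · exact hk'gt
            · exact lt_trans hk'gt (htlgt b h)
          · exact hks.1 _ h
        · intro a ha b hb
          have hak := hltk a ha
          rcases List.mem_cons.1 hb with rfl | hb
          · exact hak
          · rcases pv_mem_mergeFill ph ks ((k', v) :: tl) b hb with h | h
            · rcases List.mem_cons.1 h with rfl | h
              · exact lt_trans hak hk'gt
              · exact lt_trans hak (lt_trans hk'gt (htlgt b h))
            · exact lt_trans hak (hks.1 _ h)

-- ===== VERDICT (by name: the statement is the Claim_ definition above) =====
set_option maxRecDepth 2000 in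
theorem populate_dict_with_default_values_spec : Claim_equal_populate_dict_with_default_values := by
  intro a_dict_ placeholder_ _
  unfold Spec_populate_dict_with_default_values
  unfold populate_dict_with_default_values populate_dict_with_default_values_alt
  simp only
  set d0 := PySem.Dict.ofList a_dict_ with hd0
  -- the filled dict of port A, via the filter form and fresh-key appends
  have hkeysnd : d0.keys.Nodup := PySem.Dict.nodup_keys_ofList a_dict_
  have hitemsnd : (d0.items.map Prod.fst).Nodup := hkeysnd
  have hcont : ∀ i, d0.contains i = decide (i ∈ d0.items.map Prod.fst) :=
    fun i => PySem.Dict.contains_eq_decide_mem_keys d0 i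
  set missing := (PySem.List.pyRange 1 101).filter (fun i => !(d0.contains i)) with hmiss
  have hA : ((PySem.List.pyRange 1 101).foldl (fun d idx_ =>
      match d.get? idx_ with
      | some _ => d
      | none => d.insert idx_ placeholder_) d0).items
      = d0.items ++ missing.map (fun k => (k, placeholder_)) := by
    rw [pv_fold_eq placeholder_ (fun i => d0.contains i) (PySem.List.pyRange 1 101) d0
        (PySem.List.nodup_pyRange_one 1 101)
        (fun i _ => (PySem.Dict.contains_eq_isSome_get? d0 i).symm)]
    have := PySem.Dict.items_foldl_insert_fresh missing (fun a => a) (fun _ => placeholder_) d0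
      (fun a ha => by
        have := (List.mem_filter.1 ha).2
        simpa using this)
      (by simpa using (PySem.List.nodup_pyRange_one 1 101).filter _)
    simpa using this
  rw [hA]
  set L := d0.items ++ missing.map (fun k => (k, placeholder_)) with hL
  -- L has pairwise-distinct first keys
  have hmissnd : missing.Nodup := (PySem.List.nodup_pyRange_one 1 101).filter _
  have hmap : List.map Prod.fst (missing.map (fun k => (k, placeholder_))) = missing := by
    rw [List.map_map]
    exact List.map_id missing
  have hLnd : (L.map Prod.fst).Nodup := by
    rw [hL, List.map_append, List.nodup_append, hmap]
    refine ⟨hitemsnd, hmissnd, fun x hx b hb => ?_⟩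
    intro heq
    subst heq
    rw [hmiss, List.mem_filter] at hb
    have h2 := hb.2
    rw [hcont] at h2
    simp only [Bool.not_eq_true', decide_eq_false_iff_not] at h2
    exact h2 hx
  -- both tuple sorts are single-key sorts
  rw [pv_sorted2_eq_sorted_fst L hLnd, pv_sorted2_eq_sorted_fst d0.items hitemsnd]
  -- the existing list: sorted, strictly increasing keys
  set ex := PySem.List.sorted d0.items Prod.fst false with hex
  have hexperm : ex.Perm d0.items := PySem.List.sorted_perm d0.items Prod.fst false
  have hexnd : (ex.map Prod.fst).Nodup := (hexperm.map Prod.fst).nodup_iff.2 hitemsnd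
  have hexpw : ex.Pairwise (fun a b => a.1 < b.1) := by
    have hle : ex.Pairwise (fun a b => a.1 ≤ b.1) := PySem.List.sorted_pairwise d0.items Prod.fst
    have hne : ex.Pairwise (fun a b => a.1 ≠ b.1) := List.pairwise_map.1 hexnd
    exact (hle.and hne).imp (fun h => lt_of_le_of_ne h.1 h.2)
  -- the merge equals sorted L by the uniqueness of the strictly sorted rearrangement
  have hks := PySem.List.pairwise_lt_pyRange_one 1 101
  have hfilt : (PySem.List.pyRange 1 101).filter (fun k => !decide (k ∈ ex.map Prod.fst)) = missing := by
    refine List.filter_congr (fun k _ => ?_)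
    rw [hcont]
    rw [decide_eq_decide.2 ((hexperm.map Prod.fst).mem_iff)]
  have hperm : (pvMergeFill placeholder_ (PySem.List.pyRange 1 101) ex).Perm L := by
    refine (pv_mergeFill_perm placeholder_ (PySem.List.pyRange 1 101) ex hks hexpw).trans ?_
    rw [hfilt, hL]
    exact List.Perm.append hexperm (List.Perm.refl _)
  exact PySem.List.sorted_eq_of_perm_of_pairwise_lt L
    (pvMergeFill placeholder_ (PySem.List.pyRange 1 101) ex) Prod.fst hperm
    (pv_mergeFill_pairwise placeholder_ (PySem.List.pyRange 1 101) ex hks hexpw)
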